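-- pv_equiv track=rewrite | github.com/thelab33/futurefunded | tools/ff_layer_hygiene_v1.py | _scan_states
-- ===== SOURCE A (Python) =====
-- def _scan_states(text: str):
--     """
--     Generator of (i, ch, in_comment, in_string, string_quote, escaped)
--     Deterministic, handles /* */ comments and " ' strings with escapes.
--     """
--     in_comment = False
--     in_string = False
--     quote = ""
--     escaped = False
--     i = 0
--     n = len(text)
--     while i < n:
--         ch = text[i]
--         nxt = text[i + 1] if i + 1 < n else ""
--
--         if in_comment:
--             if ch == "*" and nxt == "/":
--                 in_comment = False
--                 i += 2
--                 continue
--             i += 1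
--             continue
--
--         if in_string:
--             if escaped:
--                 escaped = False
--                 i += 1
--                 continue
--             if ch == "\\":
--                 escaped = True
--                 i += 1
--                 continue
--             if ch == quote:
--                 in_string = False
--                 quote = ""
--                 i += 1
--                 continue
--             i += 1
--             continue
--
--         # not in comment/string
--         if ch == "/" and nxt == "*":
--             in_comment = True
--             i += 2
--             continue
--
--         if ch in ('"', "'"):
--             in_string = True
--             quote = ch
--             i += 1
--             continue
--
--         yield i, ch
--         i += 1
-- ===== SOURCE B (Python) =====
-- def _skip_string(text, k, q):
--     # advance past the string opened before position k with quote q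
--     n = len(text)
--     while k < n:
--         c = text[k]
--         if c == "\\":
--             k += 2
--         elif c == q:
--             return k + 1
--         else:
--             k += 1
--     return n
--
--
-- def _scan_states(text: str):
--     n = len(text)
--     i = 0
--     while i < n:
--         ch = text[i]
--         if ch == "/" and i + 1 < n and text[i + 1] == "*":
--             j = text.find("*/", i + 2)
--             i = n if j == -1 else j + 2
--         elif ch == '"' or ch == "'":
--             i = _skip_string(text, i + 1, ch)
--         else:
--             yield i, ch
--             i += 1
-- ===== Notes on version B (the rewrite author's own statement) =====
-- stated objective: alternative
-- what changed: Replaces A's single while-loop state machine with in_comment/in_string/escaped flags by a flag-free driver that jumps over each comment with str.find of the closing delimiter and over each string with a skipper that consumes backslash-escape pairs two characters at a time.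
import Mathlib
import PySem

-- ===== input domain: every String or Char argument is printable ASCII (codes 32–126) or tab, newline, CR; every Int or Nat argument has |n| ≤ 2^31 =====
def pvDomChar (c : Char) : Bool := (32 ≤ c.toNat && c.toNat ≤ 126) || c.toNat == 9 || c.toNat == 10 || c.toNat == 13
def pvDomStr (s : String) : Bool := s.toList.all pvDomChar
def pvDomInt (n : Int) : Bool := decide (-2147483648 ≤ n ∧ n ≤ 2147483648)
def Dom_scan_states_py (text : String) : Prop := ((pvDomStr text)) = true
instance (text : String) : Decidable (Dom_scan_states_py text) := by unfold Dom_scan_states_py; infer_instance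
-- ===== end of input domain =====

-- B replaces A's monolithic flag state machine by a driver that jumps over comments
-- (via substring search for the closing delimiter) and strings (a skipper consuming "\x" pairs), with
-- no in_comment/in_string/escaped flags; objective: alternative decomposition.
-- A is a generator; the equivalence is about the yielded sequence, materialised as a list.
-- Loops are ported with a structural fuel argument (cs.length steps always suffice,
-- since the index strictly increases each iteration); this only makes them total.

-- ===== PORT A =====
-- A's while-loop: state (in_comment, in_string, quote, escaped, i), index into the char list.
def loopA (cs : List Char) : Nat → Bool → Bool → String → Bool → Nat → List (Int × String)
  | 0, _, _, _, _, _ => []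
  | fuel+1, inC, inS, q, esc, i =>
    if i < cs.length then
      let ch := cs.getD i ' '
      let nxt := cs[i+1]?
      if inC then
        if ch = '*' ∧ nxt = some '/' then loopA cs fuel false inS q esc (i+2)
        else loopA cs fuel inC inS q esc (i+1)
      else if inS then
        if esc then loopA cs fuel inC inS q false (i+1)
        else if ch = '\\' then loopA cs fuel inC inS q true (i+1)
        else if String.singleton ch = q then loopA cs fuel inC false "" esc (i+1)
        else loopA cs fuel inC inS q esc (i+1)
      else if ch = '/' ∧ nxt = some '*' then loopA cs fuel true inS q esc (i+2)
      else if ch = '"' ∨ ch = '\'' then loopA cs fuel inC true (String.singleton ch) esc (i+1)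
      else ((i : Int), String.singleton ch) :: loopA cs fuel inC inS q esc (i+1)
    else []

def scan_states_py (text : String) : List (Int × String) :=
  loopA text.toList text.toList.length false false "" false 0

-- ===== PORT B =====
-- port of Source B's str.find of the comment-closing delimiter from position j, returning
-- the position just after the match (length if absent, matching `n if j == -1 else j + 2`)
def findClose (cs : List Char) : Nat → Nat → Nat
  | 0, _ => cs.length
  | fuel+1, j =>
    if j < cs.length then
      if cs.getD j ' ' = '*' ∧ cs[j+1]? = some '/' then j + 2 else findClose cs fuel (j+1)
    else cs.length

-- port of _skip_string
def skipStr (cs : List Char) (q : String) : Nat → Nat → Nat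
  | 0, _ => cs.length
  | fuel+1, j =>
    if j < cs.length then
      let c := cs.getD j ' '
      if c = '\\' then skipStr cs q fuel (j+2)
      else if String.singleton c = q then j + 1
      else skipStr cs q fuel (j+1)
    else cs.length

def loopB (cs : List Char) : Nat → Nat → List (Int × String)
  | 0, _ => []
  | fuel+1, i =>
    if i < cs.length then
      let c := cs.getD i ' '
      if c = '/' ∧ cs[i+1]? = some '*' then loopB cs fuel (findClose cs cs.length (i+2))
      else if c = '"' ∨ c = '\'' then loopB cs fuel (skipStr cs (String.singleton c) cs.length (i+1))
      else ((i : Int), String.singleton c) :: loopB cs fuel (i+1)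
    else []

def scan_states_py_alt (text : String) : List (Int × String) :=
  loopB text.toList text.toList.length 0

-- ===== PRECONDITION & SPEC =====
def Spec_scan_states_py (text : String) (out : List (Int × String)) : Prop := out = scan_states_py_alt text
instance (text : String) (out : List (Int × String)) : Decidable (Spec_scan_states_py text out) := by unfold Spec_scan_states_py; infer_instance

-- ===== CLAIM (what is proved, stated in full; the proofs are below) =====
def Claim_equal_scan_states_py : Prop := ∀ (text : String), Dom_scan_states_py text → Spec_scan_states_py text (scan_states_py text)

-- ===== LEMMAS AND PROOFS =====
-- past-the-end base facts
theorem findClose_len (cs : List Char) (f j : Nat) (h : ¬ j < cs.length) :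
    findClose cs f j = cs.length := by
  cases f <;> simp [findClose, h]

theorem skipStr_len (cs : List Char) (q : String) (f j : Nat) (h : ¬ j < cs.length) :
    skipStr cs q f j = cs.length := by
  cases f <;> simp [skipStr, h]

theorem loopB_len (cs : List Char) (f i : Nat) (h : ¬ i < cs.length) :
    loopB cs f i = [] := by
  cases f <;> simp [loopB, h]

-- lower bounds on the jump targets
theorem findClose_ge (cs : List Char) :
    ∀ f j, j ≤ findClose cs f j ∨ findClose cs f j = cs.length := by
  intro f
  induction f with
  | zero => intro j; right; rfl
  | succ f ih =>
    intro j
    by_cases h : j < cs.length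
    · by_cases hm : cs.getD j ' ' = '*' ∧ cs[j+1]? = some '/'
      · left; simp only [findClose, if_pos h, if_pos hm]; omega
      · simp only [findClose, if_pos h, if_neg hm]
        rcases ih (j+1) with h1 | h1
        · left; omega
        · right; exact h1
    · right; exact findClose_len cs _ j h

theorem skipStr_ge (cs : List Char) (q : String) :
    ∀ f j, j < skipStr cs q f j ∨ skipStr cs q f j = cs.length := by
  intro f
  induction f with
  | zero => intro j; right; rfl
  | succ f ih =>
    intro j
    by_cases h : j < cs.length
    · by_cases h1 : cs.getD j ' ' = '\\'
      · simp only [skipStr, if_pos h, if_pos h1]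
        rcases ih (j+2) with h2 | h2
        · left; omega
        · right; exact h2
      · by_cases h2 : String.singleton (cs.getD j ' ') = q
        · left; simp only [skipStr, if_pos h, if_neg h1, if_pos h2]; omega
        · simp only [skipStr, if_pos h, if_neg h1, if_neg h2]
          rcases ih (j+1) with h3 | h3
          · left; omega
          · right; exact h3
    · right; exact skipStr_len cs q _ j h

-- fuel irrelevance (any fuel covering the remaining distance gives the same value)
theorem findClose_fuel (cs : List Char) :
    ∀ f1 f2 j, cs.length - j ≤ f1 → cs.length - j ≤ f2 →
      findClose cs f1 j = findClose cs f2 j := by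
  intro f1
  induction f1 with
  | zero =>
    intro f2 j h1 h2
    have h : ¬ j < cs.length := by omega
    rw [findClose_len cs 0 j h, findClose_len cs f2 j h]
  | succ f ih =>
    intro f2 j h1 h2
    by_cases h : j < cs.length
    · cases f2 with
      | zero => omega
      | succ f2 =>
        by_cases hm : cs.getD j ' ' = '*' ∧ cs[j+1]? = some '/'
        · simp only [findClose, if_pos h, if_pos hm]
        · simp only [findClose, if_pos h, if_neg hm]
          exact ih f2 (j+1) (by omega) (by omega)
    · rw [findClose_len cs _ j h, findClose_len cs f2 j h]

theorem skipStr_fuel (cs : List Char) (q : String) :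
    ∀ f1 f2 j, cs.length - j ≤ f1 → cs.length - j ≤ f2 →
      skipStr cs q f1 j = skipStr cs q f2 j := by
  intro f1
  induction f1 with
  | zero =>
    intro f2 j h1 h2
    have h : ¬ j < cs.length := by omega
    rw [skipStr_len cs q 0 j h, skipStr_len cs q f2 j h]
  | succ f ih =>
    intro f2 j h1 h2
    by_cases h : j < cs.length
    · cases f2 with
      | zero => omega
      | succ f2 =>
        by_cases hb : cs.getD j ' ' = '\\'
        · simp only [skipStr, if_pos h, if_pos hb]
          exact ih f2 (j+2) (by omega) (by omega)
        · by_cases hq : String.singleton (cs.getD j ' ') = q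
          · simp only [skipStr, if_pos h, if_neg hb, if_pos hq]
          · simp only [skipStr, if_pos h, if_neg hb, if_neg hq]
            exact ih f2 (j+1) (by omega) (by omega)
    · rw [skipStr_len cs q _ j h, skipStr_len cs q f2 j h]

theorem loopB_fuel (cs : List Char) :
    ∀ f1 f2 i, cs.length - i ≤ f1 → cs.length - i ≤ f2 →
      loopB cs f1 i = loopB cs f2 i := by
  intro f1
  induction f1 with
  | zero =>
    intro f2 i h1 h2
    have h : ¬ i < cs.length := by omega
    rw [loopB_len cs 0 i h, loopB_len cs f2 i h]
  | succ f ih =>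
    intro f2 i h1 h2
    by_cases h : i < cs.length
    · cases f2 with
      | zero => omega
      | succ f2 =>
        by_cases hc : cs.getD i ' ' = '/' ∧ cs[i+1]? = some '*'
        · simp only [loopB, if_pos h, if_pos hc]
          rcases findClose_ge cs cs.length (i+2) with hg | hg
          · exact ih f2 _ (by omega) (by omega)
          · exact ih f2 _ (by omega) (by omega)
        · by_cases hq : cs.getD i ' ' = '"' ∨ cs.getD i ' ' = '\''
          · simp only [loopB, if_pos h, if_neg hc, if_pos hq]
            rcases skipStr_ge cs (String.singleton (cs.getD i ' ')) cs.length (i+1) with hg | hg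
            · exact ih f2 _ (by omega) (by omega)
            · exact ih f2 _ (by omega) (by omega)
          · simp only [loopB, if_pos h, if_neg hc, if_neg hq]
            exact congrArg _ (ih f2 (i+1) (by omega) (by omega))
    · rw [loopB_len cs _ i h, loopB_len cs f2 i h]

-- simultaneous invariant: code / comment / in-string / after-backslash states of A
-- vs B's jump targets, by induction on A's fuel (B always run with full fuel cs.length)
theorem quad (cs : List Char) : ∀ k i, cs.length - i ≤ k →
    (loopA cs k false false "" false i = loopB cs cs.length i) ∧
    (loopA cs k true false "" false i = loopB cs cs.length (findClose cs cs.length i)) ∧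
    (∀ q, loopA cs k false true q false i = loopB cs cs.length (skipStr cs q cs.length i)) ∧
    (∀ q, loopA cs k false true q true i = loopB cs cs.length (skipStr cs q cs.length (i+1))) := by
  intro k
  induction k with
  | zero =>
    intro i hi
    have h : ¬ i < cs.length := by omega
    have h1 : ¬ i + 1 < cs.length := by omega
    have hL : ¬ cs.length < cs.length := by omega
    refine ⟨?_, ?_, ?_, ?_⟩
    · rw [loopB_len cs _ i h]; rfl
    · rw [findClose_len cs _ i h, loopB_len cs _ _ hL]; rfl
    · intro q; rw [skipStr_len cs q _ i h, loopB_len cs _ _ hL]; rfl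
    · intro q; rw [skipStr_len cs q _ _ h1, loopB_len cs _ _ hL]; rfl
  | succ k ih =>
    intro i hi
    by_cases h : i < cs.length
    · refine ⟨?_, ?_, ?_, ?_⟩
      · -- code state
        rw [loopB_fuel cs cs.length (k+1) i (by omega) (by omega)]
        rw [loopA, loopB]
        simp [h]
        split_ifs with h1 h2
        · rw [(ih (i+2) (by omega)).2.1]
          rcases findClose_ge cs cs.length (i+2) with hg | hg
          · exact loopB_fuel cs cs.length k _ (by omega) (by omega)
          · exact loopB_fuel cs cs.length k _ (by omega) (by omega)
        · rw [(ih (i+1) (by omega)).2.2.1 _]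
          rcases skipStr_ge cs (String.singleton cs[i]) cs.length (i+1) with hg | hg
          · exact loopB_fuel cs cs.length k _ (by omega) (by omega)
          · exact loopB_fuel cs cs.length k _ (by omega) (by omega)
        · refine congrArg _ ?_
          rw [(ih (i+1) (by omega)).1]
          exact loopB_fuel cs cs.length k _ (by omega) (by omega)
      · -- comment state
        rw [findClose_fuel cs cs.length (k+1) i (by omega) (by omega)]
        rw [loopA, findClose]
        simp [h]
        split_ifs with h1
        · exact (ih (i+2) (by omega)).1
        · rw [findClose_fuel cs k cs.length (i+1) (by omega) (by omega)]
          exact (ih (i+1) (by omega)).2.1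
      · -- string state, not escaped
        intro q
        rw [skipStr_fuel cs q cs.length (k+1) i (by omega) (by omega)]
        rw [loopA]
        conv_rhs => rw [skipStr]
        simp [h]
        split_ifs with h1 h2
        · rw [skipStr_fuel cs q k cs.length (i+2) (by omega) (by omega)]
          exact (ih (i+1) (by omega)).2.2.2 q
        · exact (ih (i+1) (by omega)).1
        · rw [skipStr_fuel cs q k cs.length (i+1) (by omega) (by omega)]
          exact (ih (i+1) (by omega)).2.2.1 q
      · -- string state, escaped
        intro q
        rw [loopA]
        simp [h]
        exact (ih (i+1) (by omega)).2.2.1 q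
    · -- i past the end: same argument as the fuel-0 base case
      have h1 : ¬ i + 1 < cs.length := by omega
      have hL : ¬ cs.length < cs.length := by omega
      refine ⟨?_, ?_, ?_, ?_⟩
      · rw [loopB_len cs _ i h, loopA]; simp [h]
      · rw [findClose_len cs _ i h, loopB_len cs _ _ hL, loopA]; simp [h]
      · intro q; rw [skipStr_len cs q _ i h, loopB_len cs _ _ hL, loopA]; simp [h]
      · intro q; rw [skipStr_len cs q _ _ h1, loopB_len cs _ _ hL, loopA]; simp [h]

-- ===== VERDICT (by name: the statement is the Claim_ definition above) =====
theorem scan_states_py_spec : Claim_equal_scan_states_py := by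
  intro text _
  unfold Spec_scan_states_py scan_states_py scan_states_py_alt
  exact (quad text.toList text.toList.length 0 (by omega)).1
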